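-- pv_equiv track=rewrite | github.com/chelab/m6A-SACseq | bin/trim_ends.py | alignment_to_md
-- ===== SOURCE A (Python) =====
-- def alignment_to_md(alignment):
--     status = []
--     bases = []
--     for qp, rp, rb in alignment:
--         if qp is None:
--             status.append("I")
--             bases.append(rb.upper())
--         elif rb and rb.islower():
--             status.append("X")
--             bases.append(rb.upper())
--         else:
--             status.append("=")
--             bases.append(1)
--
--     md = ""
--     s_pre = ""
--     n_match = 0
--
--     for s, b in zip(status, bases):
--         if s == "=":
--             n_match += 1
--         elif s == "I":
--             if s_pre != "I":
--                 md += str(n_match) + "^" + b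
--                 n_match = 0
--             else:
--                 md += "^" + b
--         elif s == "X":
--             if s_pre != "X":
--                 md += str(n_match) + b
--                 n_match = 0
--             else:
--                 md += b
--         s_pre = s
--     md += str(n_match)
--
--     return md
-- ===== SOURCE B (Python) =====
-- def alignment_to_md(alignment):
--     toks = []
--     for qp, rp, rb in alignment:
--         if qp is None:
--             toks.append(("I", "^" + rb.upper()))
--         elif rb and rb.islower():
--             toks.append(("X", rb.upper()))
--         else:
--             toks.append(("=", ""))
--     parts = []
--     n_match = 0
--     i = 0
--     while i < len(toks):
--         st, piece = toks[i]
--         i += 1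
--         if st == "=":
--             n_match += 1
--             continue
--         text = piece
--         while i < len(toks) and toks[i][0] == st:
--             text += toks[i][1]
--             i += 1
--         parts.append(str(n_match) + text)
--         n_match = 0
--     parts.append(str(n_match))
--     return "".join(parts)
-- ===== Notes on version B (the rewrite author's own statement) =====
-- stated objective: alternative
-- what changed: A builds parallel status/bases lists and then runs a stateful scan carrying s_pre/n_match over their zip; B tokenizes once and emits the MD string by recursion on runs, consuming a whole run of equal I/X tokens per step, with no s_pre state. Pre_ excludes tuples with qp None and rb None, on which both A and B raise AttributeError.
import Mathlib
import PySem

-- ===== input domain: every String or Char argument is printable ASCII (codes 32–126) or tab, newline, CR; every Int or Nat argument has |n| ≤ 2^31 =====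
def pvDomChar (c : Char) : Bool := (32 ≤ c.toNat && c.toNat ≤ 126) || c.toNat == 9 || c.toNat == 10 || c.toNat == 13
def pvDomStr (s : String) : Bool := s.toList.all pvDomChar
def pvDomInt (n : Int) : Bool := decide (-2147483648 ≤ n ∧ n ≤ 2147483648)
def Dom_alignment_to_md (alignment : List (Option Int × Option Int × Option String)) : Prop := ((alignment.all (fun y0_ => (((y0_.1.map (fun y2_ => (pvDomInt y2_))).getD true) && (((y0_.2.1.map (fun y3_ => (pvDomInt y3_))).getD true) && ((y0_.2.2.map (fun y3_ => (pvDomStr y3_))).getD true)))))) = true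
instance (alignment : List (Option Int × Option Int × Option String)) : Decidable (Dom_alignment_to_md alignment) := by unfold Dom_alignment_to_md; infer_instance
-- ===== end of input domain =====

-- B replaces A's two passes (status/bases lists + stateful s_pre/n_match scan) by a
-- tokenize-then-recursive run-splitting emitter; alternative decomposition, same cost.


-- shared helper: Python's str.islower() on a list of chars (exact on ASCII:
-- at least one cased char and no uppercase cased char)
def pyStrIslower (cs : List Char) : Bool :=
  cs.any PySem.Chars.islower && cs.all (fun c => !PySem.Chars.isupper c)

-- ===== PORT A =====
-- first loop of A: appends to status/bases; Python appends the unused int 1 for '='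
-- (a placeholder never read), ported as the empty char list.
def stepClassify (acc : List String × List (List Char))
    (t : Option Int × Option Int × Option String) : List String × List (List Char) :=
  let (qp, _rp, rb) := t
  if qp = none then
    (acc.1 ++ ["I"], acc.2 ++ [PySem.Chars.upper (rb.getD "").toList])
  else if rb.getD "" ≠ "" && pyStrIslower (rb.getD "").toList then
    (acc.1 ++ ["X"], acc.2 ++ [PySem.Chars.upper (rb.getD "").toList])
  else
    (acc.1 ++ ["="], acc.2 ++ [[]])

-- second loop of A: state (md, s_pre, n_match)
def stepMd (st : List Char × String × Int) (sb : String × List Char) :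
    List Char × String × Int :=
  let (s, b) := sb
  let (md, s_pre, n) := st
  if s = "=" then (md, s, n + 1)
  else if s = "I" then
    if s_pre ≠ "I" then (md ++ PySem.Int.toChars n ++ '^' :: b, s, 0)
    else (md ++ '^' :: b, s, n)
  else if s = "X" then
    if s_pre ≠ "X" then (md ++ PySem.Int.toChars n ++ b, s, 0)
    else (md ++ b, s, n)
  else (md, s, n)

def alignment_to_md (alignment : List (Option Int × Option Int × Option String)) : String :=
  let sb := alignment.foldl stepClassify ([], [])
  let r := (sb.1.zip sb.2).foldl stepMd ([], "", 0)
  String.ofList (r.1 ++ PySem.Int.toChars r.2.2)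

-- ===== PORT B =====
-- B's token: status together with the exact text the token contributes
def bTok (t : Option Int × Option Int × Option String) : String × List Char :=
  let (qp, _rp, rb) := t
  if qp = none then ("I", '^' :: PySem.Chars.upper (rb.getD "").toList)
  else if rb.getD "" ≠ "" && pyStrIslower (rb.getD "").toList then
    ("X", PySem.Chars.upper (rb.getD "").toList)
  else ("=", [])

-- B's inner while loop: extend text while the next token has the same status;
-- returns the run's text and the tokens after the run
def runInner (st : String) (text : List Char) :
    List (String × List Char) → List Char × List (String × List Char)
  | [] => (text, [])
  | (s, p) :: rest =>
    if s = st then runInner st (text ++ p) rest else (text, (s, p) :: rest)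

theorem runInner_snd_length_le (st : String) (l : List (String × List Char)) :
    ∀ text, (runInner st text l).2.length ≤ l.length := by
  induction l with
  | nil => intro text; simp [runInner]
  | cons h t ih =>
    intro text
    obtain ⟨s, p⟩ := h
    simp only [runInner]
    split
    · exact Nat.le_succ_of_le (ih _)
    · simp

-- B's outer while loop over the tokens, with accumulators parts / n_match
def emitLoop (parts : List (List Char)) (n : Int)
    (toks : List (String × List Char)) : List (List Char) :=
  match toks with
  | [] => parts ++ [PySem.Int.toChars n]
  | (st, piece) :: rest =>
    if st = "=" then emitLoop parts (n + 1) rest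
    else
      emitLoop (parts ++ [PySem.Int.toChars n ++ (runInner st piece rest).1]) 0
        (runInner st piece rest).2
  termination_by toks.length
  decreasing_by
    · simp
    · have := runInner_snd_length_le st rest piece
      simp only [List.length_cons]
      omega

def alignment_to_md_alt (alignment : List (Option Int × Option Int × Option String)) : String :=
  let toks := alignment.foldl (fun acc t => acc ++ [bTok t]) []
  String.ofList (emitLoop [] 0 toks).flatten

-- ===== PRECONDITION & SPEC =====
-- Pre_ excludes inputs with qp = None and rb = None in some tuple: there both A and B
-- raise AttributeError (rb.upper() on None).
def Pre_alignment_to_md (alignment : List (Option Int × Option Int × Option String)) : Prop :=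
  ∀ t ∈ alignment, t.1 = none → t.2.2 ≠ none
instance (alignment : List (Option Int × Option Int × Option String)) : Decidable (Pre_alignment_to_md alignment) := by unfold Pre_alignment_to_md; infer_instance
def pvWitness_alignment_to_md : (List (Option Int × Option Int × Option String)) :=
  [(none, some 3, some "a"), (some 1, some 4, some "g"), (some 2, some 5, some "C")]

def Spec_alignment_to_md (alignment : List (Option Int × Option Int × Option String)) (out : String) : Prop := out = alignment_to_md_alt alignment
instance (alignment : List (Option Int × Option Int × Option String)) (out : String) : Decidable (Spec_alignment_to_md alignment out) := by unfold Spec_alignment_to_md; infer_instance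

-- ===== CLAIM (what is proved, stated in full; the proofs are below) =====
def Claim_equal_alignment_to_md : Prop := ∀ (alignment : List (Option Int × Option Int × Option String)), Dom_alignment_to_md alignment → Pre_alignment_to_md alignment → Spec_alignment_to_md alignment (alignment_to_md alignment)

-- ===== LEMMAS AND PROOFS =====

-- recursive view of B's loops, used only in the proofs
def takeRun (st : String) : List (String × List Char) → List Char × List (String × List Char)
  | [] => ([], [])
  | (s, p) :: rest =>
    if s = st then
      let (text, r) := takeRun st rest
      (p ++ text, r)
    else ([], (s, p) :: rest)

theorem takeRun_snd_length_le (st : String) (l : List (String × List Char)) :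
    (takeRun st l).2.length ≤ l.length := by
  induction l with
  | nil => simp [takeRun]
  | cons h t ih =>
    obtain ⟨s, p⟩ := h
    simp only [takeRun]
    split
    · exact Nat.le_succ_of_le ih
    · simp

def emit (n : Int) (toks : List (String × List Char)) : List Char :=
  match toks with
  | [] => PySem.Int.toChars n
  | (st, piece) :: rest =>
    if st = "=" then emit (n + 1) rest
    else
      PySem.Int.toChars n ++ piece ++ (takeRun st rest).1 ++ emit 0 (takeRun st rest).2
  termination_by toks.length
  decreasing_by
    · simp
    · have := takeRun_snd_length_le st rest
      simp only [List.length_cons]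
      omega

theorem runInner_eq_takeRun (st : String) (l : List (String × List Char)) :
    ∀ text, runInner st text l = (text ++ (takeRun st l).1, (takeRun st l).2) := by
  induction l with
  | nil => intro text; simp [runInner, takeRun]
  | cons h t ih =>
    intro text
    obtain ⟨s, p⟩ := h
    simp only [runInner, takeRun]
    split
    · simp [ih, List.append_assoc]
    · simp

theorem flatten_emitLoop (parts : List (List Char)) (n : Int)
    (toks : List (String × List Char)) :
    (emitLoop parts n toks).flatten = parts.flatten ++ emit n toks := by
  induction parts, n, toks using emitLoop.induct with
  | case1 parts n => simp [emitLoop, emit]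
  | case2 parts n piece rest ih =>
    rw [emitLoop, emit]
    simpa using ih
  | case3 parts n st piece rest hne ih =>
    rw [emitLoop, emit]
    simp only [hne, if_neg, not_false_iff]
    rw [ih]
    simp [runInner_eq_takeRun, List.append_assoc]

-- A's per-tuple classification: status and base (without the '^' marker)
def clsA (t : Option Int × Option Int × Option String) : String × List Char :=
  let (qp, _rp, rb) := t
  if qp = none then ("I", PySem.Chars.upper (rb.getD "").toList)
  else if rb.getD "" ≠ "" && pyStrIslower (rb.getD "").toList then
    ("X", PySem.Chars.upper (rb.getD "").toList)
  else ("=", [])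

-- turns an A token into the corresponding B token
def mTok (x : String × List Char) : String × List Char :=
  (x.1, if x.1 = "I" then '^' :: x.2 else x.2)

def WFtoks (l : List (String × List Char)) : Prop :=
  ∀ x ∈ l, x.1 = "I" ∨ x.1 = "X" ∨ x.1 = "="

theorem bTok_eq_mTok_clsA (t : Option Int × Option Int × Option String) :
    bTok t = mTok (clsA t) := by
  obtain ⟨qp, rp, rb⟩ := t
  simp only [bTok, clsA, mTok]
  split_ifs <;> simp_all

theorem classify_eq_maps (l : List (Option Int × Option Int × Option String)) :
    ∀ s0 b0, l.foldl stepClassify (s0, b0) =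
      (s0 ++ l.map (fun t => (clsA t).1), b0 ++ l.map (fun t => (clsA t).2)) := by
  induction l with
  | nil => simp
  | cons h t ih =>
    intro s0 b0
    obtain ⟨qp, rp, rb⟩ := h
    simp only [List.foldl_cons, List.map_cons, ih]
    simp only [stepClassify, clsA]
    split_ifs <;> simp

theorem wf_map_clsA (l : List (Option Int × Option Int × Option String)) :
    WFtoks (l.map clsA) := by
  intro x hx
  simp only [List.mem_map] at hx
  obtain ⟨t, _, rfl⟩ := hx
  obtain ⟨qp, rp, rb⟩ := t
  simp only [clsA]
  split_ifs <;> simp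

-- consuming one run: A's scan over the run equals appending takeRun's text
theorem run_consume (st : String) (hst : st = "I" ∨ st = "X") :
    ∀ (l : List (String × List Char)) (md : List Char), WFtoks l →
      (takeRun st (l.map mTok)).2 = (l.dropWhile (fun x => x.1 == st)).map mTok ∧
      l.foldl stepMd (md, st, 0) =
        (l.dropWhile (fun x => x.1 == st)).foldl stepMd
          (md ++ (takeRun st (l.map mTok)).1, st, 0) := by
  intro l
  induction l with
  | nil => intro md _; simp [takeRun]
  | cons h t ih =>
    intro md hwf
    obtain ⟨s, b⟩ := h
    by_cases hs : s = st
    · subst hs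
      have hne : s ≠ "=" := by rcases hst with h1 | h1 <;> subst h1 <;> simp
      have hrec := ih (md ++ (mTok (s, b)).2) (fun x hx => hwf x (List.mem_cons_of_mem _ hx))
      constructor
      · simpa [takeRun, mTok, List.dropWhile_cons] using hrec.1
      · have hstep : stepMd (md, s, 0) (s, b) = (md ++ (mTok (s, b)).2, s, 0) := by
          rcases hst with h1 | h1 <;> subst h1 <;> simp [stepMd, mTok]
        simp only [List.foldl_cons, hstep, List.dropWhile_cons]
        simpa [takeRun, mTok, List.append_assoc] using hrec.2
    · constructor
      · simp [takeRun, mTok, hs]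
      · simp [takeRun, mTok, hs]

-- head of a dropWhile fails the predicate
theorem head?_dropWhile_false {α : Type} (p : α → Bool) (l : List α) {x : α}
    (hx : (l.dropWhile p).head? = some x) : p x = false := by
  have h := List.find?_not_eq_head?_dropWhile (p := p) (l := l)
  rw [hx] at h
  simpa using List.find?_some h

-- one I/X token followed by the rest: A emits the pending count and the run's text
theorem nonmatch_case (st : String) (hst : st = "I" ∨ st = "X")
    (b : List Char) (rest : List (String × List Char)) (md : List Char)
    (s_pre : String) (n : Int) (hpre : s_pre ≠ st) (hwfr : WFtoks rest)
    (IH : ∀ l' : List (String × List Char), l'.length ≤ rest.length →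
      ∀ (md : List Char) (s_pre : String) (n : Int), WFtoks l' →
        (∀ s b, l'.head? = some (s, b) → s = "=" ∨ s ≠ s_pre) →
        (l'.foldl stepMd (md, s_pre, n)).1 ++
            PySem.Int.toChars (l'.foldl stepMd (md, s_pre, n)).2.2 =
          md ++ emit n (l'.map mTok)) :
    (((st, b) :: rest).foldl stepMd (md, s_pre, n)).1 ++
        PySem.Int.toChars ((((st, b) :: rest)).foldl stepMd (md, s_pre, n)).2.2 =
      md ++ emit n (((st, b) :: rest).map mTok) := by
  have hne : st ≠ "=" := by rcases hst with h | h <;> subst h <;> decide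
  have hstep : stepMd (md, s_pre, n) (st, b) =
      (md ++ PySem.Int.toChars n ++ (mTok (st, b)).2, st, 0) := by
    rcases hst with h | h <;> subst h <;>
      simp [stepMd, mTok, hpre, List.append_assoc]
  have hrun := run_consume st hst rest
    (md ++ PySem.Int.toChars n ++ (mTok (st, b)).2) hwfr
  have hwl' : WFtoks (rest.dropWhile (fun x => x.1 == st)) := fun x hx =>
    hwfr x ((List.dropWhile_sublist _).subset hx)
  have hlenl' : (rest.dropWhile (fun x => x.1 == st)).length ≤ rest.length :=
    List.length_dropWhile_le _ _
  have hheadl' : ∀ s b, (rest.dropWhile (fun x => x.1 == st)).head? = some (s, b) →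
      s = "=" ∨ s ≠ st := by
    intro s b hsb
    right
    have := head?_dropWhile_false (fun x => x.1 == st) rest hsb
    simpa using this
  have hih := IH _ hlenl'
    (md ++ PySem.Int.toChars n ++ (mTok (st, b)).2 ++ (takeRun st (rest.map mTok)).1)
    st 0 hwl' hheadl'
  simp only [List.foldl_cons, hstep, hrun.2, hih]
  rw [List.map_cons]
  conv_rhs => rw [emit]
  have hm1 : (mTok (st, b)).1 = st := rfl
  simp [hm1, hne, List.append_assoc]
  rw [hrun.1]

-- the main invariant: A's scan + final count = emit, whenever the first token's
-- status is '=' or differs from s_pre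
theorem scan_eq_emit :
    ∀ (N : Nat) (l : List (String × List Char)), l.length ≤ N →
      ∀ (md : List Char) (s_pre : String) (n : Int), WFtoks l →
        (∀ s b, l.head? = some (s, b) → s = "=" ∨ s ≠ s_pre) →
        (l.foldl stepMd (md, s_pre, n)).1 ++
            PySem.Int.toChars (l.foldl stepMd (md, s_pre, n)).2.2 =
          md ++ emit n (l.map mTok) := by
  intro N
  induction N with
  | zero =>
    intro l hl md s_pre n _ _
    have : l = [] := List.eq_nil_of_length_eq_zero (Nat.le_zero.mp hl)
    subst this; simp [emit]
  | succ N ih =>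
    intro l hl md s_pre n hwf hhead
    match l with
    | [] => simp [emit]
    | (s, b) :: rest =>
      have hwfr : WFtoks rest := fun x hx => hwf x (List.mem_cons_of_mem _ hx)
      have hlen : rest.length ≤ N := by simp at hl; omega
      have IH : ∀ l' : List (String × List Char), l'.length ≤ rest.length →
          ∀ (md : List Char) (s_pre : String) (n : Int), WFtoks l' →
            (∀ s b, l'.head? = some (s, b) → s = "=" ∨ s ≠ s_pre) →
            (l'.foldl stepMd (md, s_pre, n)).1 ++
                PySem.Int.toChars (l'.foldl stepMd (md, s_pre, n)).2.2 =
              md ++ emit n (l'.map mTok) :=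
        fun l' h => ih l' (le_trans h hlen)
      rcases hwf (s, b) List.mem_cons_self with hs | hs | hs
      · subst hs
        have hpre : s_pre ≠ "I" := by
          rcases hhead "I" b rfl with h | h
          · exact absurd h (by decide)
          · exact fun hc => h hc.symm
        exact nonmatch_case "I" (Or.inl rfl) b rest md s_pre n hpre hwfr IH
      · subst hs
        have hpre : s_pre ≠ "X" := by
          rcases hhead "X" b rfl with h | h
          · exact absurd h (by decide)
          · exact fun hc => h hc.symm
        exact nonmatch_case "X" (Or.inr rfl) b rest md s_pre n hpre hwfr IH
      · subst hs
        have hstep : stepMd (md, s_pre, n) ("=", b) = (md, "=", n + 1) := by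
          simp [stepMd]
        have hih := ih rest hlen md "=" (n + 1) hwfr
          (fun s b _ => by by_cases h : s = "=" <;> [exact Or.inl h; exact Or.inr h])
        simp only [List.foldl_cons, hstep, hih, List.map_cons]
        conv_rhs => rw [emit]
        simp [mTok]

-- ===== VERDICT (by name: the statement is the Claim_ definition above) =====
theorem alignment_to_md_spec : Claim_equal_alignment_to_md := by
  intro alignment _ _
  unfold Spec_alignment_to_md alignment_to_md alignment_to_md_alt
  rw [classify_eq_maps alignment [] []]
  simp only [List.nil_append, List.zip_map']
  have hmap : (alignment.map fun t => ((clsA t).1, (clsA t).2)) = alignment.map clsA := by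
    simp
  rw [hmap]
  have hwf := wf_map_clsA alignment
  have hhead : ∀ s b, (alignment.map clsA).head? = some (s, b) → s = "=" ∨ s ≠ "" := by
    intro s b h
    rcases hwf (s, b) (List.mem_of_mem_head? h) with h1 | h1 | h1 <;> subst h1 <;> simp
  have hmain := scan_eq_emit (alignment.map clsA).length (alignment.map clsA) le_rfl
    [] "" 0 hwf hhead
  simp only [List.nil_append] at hmain
  rw [hmain, PySem.List.foldl_append_singleton_eq_map, flatten_emitLoop]
  simp only [List.flatten_nil, List.nil_append]
  simp only [List.map_map, Function.comp_def]
  congr 2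
  exact List.map_congr_left fun x _ => (bTok_eq_mTok_clsA x).symm
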